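-- pv_equiv track=rewrite | github.com/GSYBD/SXLNLP | 王柱雄/fourthWeek/TextFullSegmentation.py | Text_full_segmentation
-- ===== SOURCE A (Python) =====
-- def Text_full_segmentation(text, dictionary):
--     """
--     对输入文本进行全切分，并结合词语概率返回所有可能的分词结果。
--     """
--     if not text:
--         return [[]]
--
--     results = []
--
--     for i in range(1, len(text) + 1):
--         word = text[:i]
--         if word in dictionary:
--             # 对剩余部分进行全切分
--             for sub_text in Text_full_segmentation(text[i:], dictionary):
--                 results.append(([word] + sub_text))
--
--     return results
-- ===== SOURCE B (Python) =====
-- def Text_full_segmentation(text, dictionary):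
--     n = len(text)
--     dp = [None] * (n + 1)
--     dp[n] = [[]]
--     for pos in range(n - 1, -1, -1):
--         res = []
--         for i in range(pos + 1, n + 1):
--             word = text[pos:i]
--             if word in dictionary:
--                 for sub in dp[i]:
--                     res.append([word] + sub)
--         dp[pos] = res
--     return dp[0]
-- ===== Notes on version B (the rewrite author's own statement) =====
-- stated objective: alternative
-- what changed: Replaces the top-down recursion over suffixes with a bottom-up DP table dp[pos] of all segmentations of text[pos:], filled once from the end; it trades recursion for an iterative table (the output itself can be exponential, so overall time is output-bound either way).
import Mathlib
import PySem

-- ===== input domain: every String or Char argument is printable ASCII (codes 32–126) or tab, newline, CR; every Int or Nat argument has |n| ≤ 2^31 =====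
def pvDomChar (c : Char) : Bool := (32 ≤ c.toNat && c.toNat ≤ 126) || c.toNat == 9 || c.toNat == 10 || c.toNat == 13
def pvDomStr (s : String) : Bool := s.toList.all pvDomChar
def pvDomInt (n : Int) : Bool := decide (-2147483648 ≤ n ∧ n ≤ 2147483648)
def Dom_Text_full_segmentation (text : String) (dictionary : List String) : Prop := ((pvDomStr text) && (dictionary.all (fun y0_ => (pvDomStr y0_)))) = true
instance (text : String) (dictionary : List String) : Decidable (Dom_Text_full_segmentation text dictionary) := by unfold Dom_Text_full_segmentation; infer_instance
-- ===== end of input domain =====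

-- B replaces A's top-down recursion by a bottom-up DP table over suffix positions
-- (objective: alternative decomposition); return values are identical.

-- ===== PORT A =====
-- A's recursion over the remaining text (as List Char); the inner
-- `for i in range(1, len(text)+1)` loop is the mutual helper `segAloop`,
-- carrying `results` and the loop counter k (Python's i is k + 1).
mutual
def segA (cs : List Char) (d : List String) : List (List String) :=
  if cs.isEmpty then [[]]
  else segAloop cs d 0 []
termination_by (cs.length, cs.length + 1)
decreasing_by
  apply Prod.Lex.right; omega
def segAloop (cs : List Char) (d : List String) (k : Nat) (results : List (List String)) : List (List String) :=
  if h : k + 1 ≤ cs.length then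
    let word := String.mk (cs.take (k + 1))
    let results' := if d.contains word then
        results ++ (segA (cs.drop (k + 1)) d).map (fun sub => word :: sub)
      else results
    segAloop cs d (k + 1) results'
  else results
termination_by (cs.length, cs.length - k)
decreasing_by
  · apply Prod.Lex.left; simp; omega
  · apply Prod.Lex.right; omega
end

def Text_full_segmentation (text : String) (dictionary : List String) : List (List String) :=
  segA text.toList dictionary

-- ===== PORT B =====
-- B's inner loop for one position: cs is the suffix text[pos:], t holds the already
-- filled dp rows for the later positions (t[i-1] = dp[pos+i]); i = k+1 runs 1..|cs|.
def rowB (cs : List Char) (d : List String) (t : List (List (List String))) : List (List String) :=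
  (List.range cs.length).foldl (fun res k =>
    let i := k + 1
    let word := String.mk (cs.take i)
    if d.contains word then res ++ (t.getD (i - 1) []).map (fun sub => word :: sub)
    else res) []

-- B's dp array, built from the last position backwards (the `for pos in
-- range(n-1, -1, -1)` loop): element 0 is dp[pos], the tail is dp[pos+1..n].
def tableB (cs : List Char) (d : List String) : List (List (List String)) :=
  match cs with
  | [] => [[[]]]
  | _ :: rest =>
    let t := tableB rest d
    rowB cs d t :: t

def Text_full_segmentation_alt (text : String) (dictionary : List String) : List (List String) :=
  (tableB text.toList dictionary).headD []

-- ===== PRECONDITION & SPEC =====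
def Spec_Text_full_segmentation (text : String) (dictionary : List String) (out : List (List String)) : Prop := out = Text_full_segmentation_alt text dictionary
instance (text : String) (dictionary : List String) (out : List (List String)) : Decidable (Spec_Text_full_segmentation text dictionary out) := by unfold Spec_Text_full_segmentation; infer_instance

-- ===== CLAIM (what is proved, stated in full; the proofs are below) =====
def Claim_equal_Text_full_segmentation : Prop := ∀ (text : String) (dictionary : List String), Dom_Text_full_segmentation text dictionary → Spec_Text_full_segmentation text dictionary (Text_full_segmentation text dictionary)

-- ===== LEMMAS AND PROOFS =====

-- A's loop from counter k equals a fold over the explicit index list range' (k+1) (n-k).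
theorem segAloop_eq_foldl (cs : List Char) (d : List String) :
    ∀ (k : Nat) (acc : List (List String)),
    segAloop cs d k acc =
      (List.range' (k + 1) (cs.length - k)).foldl (fun res j =>
        let word := String.mk (cs.take j)
        if d.contains word then res ++ (segA (cs.drop j) d).map (fun sub => word :: sub)
        else res) acc := by
  intro k acc
  by_cases h : k + 1 ≤ cs.length
  · have hlen : cs.length - k = (cs.length - (k + 1)) + 1 := by omega
    rw [segAloop.eq_def, dif_pos h, hlen, List.range'_succ, List.foldl_cons]
    exact segAloop_eq_foldl cs d (k + 1) _
  · rw [segAloop.eq_def, dif_neg h]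
    have : cs.length - k = 0 := by omega
    simp [this]
termination_by k acc => cs.length - k

theorem segA_nil (d : List String) : segA [] d = [[]] := by
  rw [segA.eq_def]; simp

-- index j of the mapped tails list is f applied to the j-th suffix
theorem getD_map_tails {α β : Type} (f : List α → List β) (xs : List α) :
    ∀ (j : Nat), j ≤ xs.length → ((xs.tails.map f).getD j []) = f (xs.drop j) := by
  induction xs with
  | nil =>
    intro j hj
    have h0 : j = 0 := Nat.le_zero.mp hj
    subst h0; simp
  | cons x rest ih =>
    intro j hj
    cases j with
    | zero => simp
    | succ j' =>
      simp only [List.tails_cons, List.map_cons, List.getD_cons_succ, List.drop_succ_cons]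
      exact ih j' (by simpa using hj)

-- B's table is exactly A's segmentation of every suffix.
theorem tableB_eq (d : List String) :
    ∀ (cs : List Char), tableB cs d = cs.tails.map (fun s => segA s d) := by
  intro cs
  induction cs with
  | nil => simp [tableB, segA_nil]
  | cons c rest ih =>
    rw [tableB, ih, List.tails_cons, List.map_cons]
    congr 1
    -- row over the precomputed table = A's loop for this suffix
    rw [segA.eq_def, if_neg (by simp), segAloop_eq_foldl]
    have hlen : (c :: rest).length - 0 = (c :: rest).length := by simp
    rw [hlen]
    unfold rowB
    rw [show (0:Nat) + 1 = 1 from rfl, List.range'_eq_map_range, List.foldl_map]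
    apply PySem.List.foldl_congr_mem
    intro acc k hk
    have hk' : k ≤ rest.length := by
      simpa using Nat.lt_succ_iff.mp (by simpa using List.mem_range.mp hk)
    simp only [show (1:Nat) + k = k + 1 by omega, Nat.add_sub_cancel, List.drop_succ_cons]
    rw [getD_map_tails _ rest k hk']

-- ===== VERDICT (by name: the statement is the Claim_ definition above) =====
theorem Text_full_segmentation_spec : Claim_equal_Text_full_segmentation := by
  intro text dictionary _
  unfold Spec_Text_full_segmentation Text_full_segmentation Text_full_segmentation_alt
  rw [tableB_eq]
  cases text.toList with
  | nil => simp
  | cons c rest => simp
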